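-- pv_equiv track=rewrite | github.com/youbing5921/Baekjoon_yb | 프로그래머스/2/389479. 서버 증설 횟수/서버 증설 횟수.py | solution
-- ===== SOURCE A (Python) =====
-- def solution(players, m, k):
--     answer = 0
--     n = len(players)
--     server = [0] * n
--
--     for time in range(n):
--         p = players[time]
--         s = server[time]
--         if p >= (s+1) * m: # 서버 증설 필요
--             need = p // m - s
--             answer += need
--             for kk in range(k):
--                 if time + kk < n:
--                     server[time+kk] += need
--                 else:
--                     break
--
--     return answer
-- ===== SOURCE B (Python) =====
-- def solution(players, m, k):
--     # O(n) expiry (difference) accumulator: `cur` = servers currently running,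
--     # `expire[t]` = number of servers that shut down right before minute t.
--     n = len(players)
--     expire = [0] * (n + 1)
--     cur = 0
--     answer = 0
--     for t in range(n):
--         cur -= expire[t]
--         p = players[t]
--         if p >= (cur + 1) * m:
--             need = p // m - cur
--             answer += need
--             if k > 0:
--                 cur += need
--                 if t + k <= n:
--                     expire[t + k] += need
--     return answer
-- ===== Notes on version B (the rewrite author's own statement) =====
-- stated objective: faster
-- what changed: Replaces A's per-scale-up inner loop that adds the new server count to the next k slots of a server array with a single-pass expiry (difference) accumulator: a running count of active servers plus one scheduled decrement at time t+k, turning O(n*k) into O(n).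
import Mathlib
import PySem

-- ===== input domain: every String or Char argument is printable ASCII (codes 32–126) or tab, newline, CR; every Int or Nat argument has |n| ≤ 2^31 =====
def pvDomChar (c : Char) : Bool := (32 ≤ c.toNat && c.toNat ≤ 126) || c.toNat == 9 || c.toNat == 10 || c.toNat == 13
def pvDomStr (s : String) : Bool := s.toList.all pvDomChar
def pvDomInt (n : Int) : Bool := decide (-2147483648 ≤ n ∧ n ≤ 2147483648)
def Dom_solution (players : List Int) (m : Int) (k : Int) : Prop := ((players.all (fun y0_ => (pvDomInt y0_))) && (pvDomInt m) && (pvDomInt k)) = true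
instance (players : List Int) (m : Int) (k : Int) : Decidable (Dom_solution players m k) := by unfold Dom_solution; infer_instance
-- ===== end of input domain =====

-- B replaces A's O(n*k) per-scale-up window updates of a server array with a single-pass
-- expiry (difference) accumulator; objective: faster (asymptotic, O(n*k) -> O(n)).

-- ===== PORT A =====
-- inner 'for kk in range(k): if time+kk < n: server[time+kk] += need else: break'
def innerA (n : Nat) (need : Int) (time : Nat) : Nat → Nat → List Int → List Int
  | 0, _, server => server
  | fuel+1, kk, server =>
      if time + kk < n then
        innerA n need time fuel (kk+1) (server.set (time+kk) (server.getD (time+kk) 0 + need))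
      else server

-- outer 'for time in range(n)' (fuel = n - time)
def loopA (players : List Int) (m k : Int) (n : Nat) : Nat → Nat → List Int → Int → Int
  | 0, _, _, ans => ans
  | fuel+1, t, server, ans =>
      let p := players.getD t 0
      let s := server.getD t 0
      if (s + 1) * m ≤ p then
        loopA players m k n fuel (t+1) (innerA n (PySem.Int.floordiv p m - s) t k.toNat 0 server)
          (ans + (PySem.Int.floordiv p m - s))
      else loopA players m k n fuel (t+1) server ans

def solution (players : List Int) (m : Int) (k : Int) : Int :=
  loopA players m k players.length players.length 0 (List.replicate players.length 0) 0

-- ===== PORT B =====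
-- single pass with running active-server count `cur` and expiry slots `expire`
def loopB (players : List Int) (m k : Int) (n : Nat) : Nat → Nat → List Int → Int → Int → Int
  | 0, _, _, _, ans => ans
  | fuel+1, t, expire, cur, ans =>
      let cur1 := cur - expire.getD t 0
      let p := players.getD t 0
      if (cur1 + 1) * m ≤ p then
        let need := PySem.Int.floordiv p m - cur1
        if 0 < k then
          loopB players m k n fuel (t+1)
            (if (t : Int) + k ≤ (n : Int) then
               expire.set (t + k.toNat) (expire.getD (t + k.toNat) 0 + need)
             else expire)
            (cur1 + need) (ans + need)
        else loopB players m k n fuel (t+1) expire cur1 (ans + need)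
      else loopB players m k n fuel (t+1) expire cur1 ans

def solution_alt (players : List Int) (m : Int) (k : Int) : Int :=
  loopB players m k players.length players.length 0 (List.replicate (players.length + 1) 0) 0 0

-- ===== PRECONDITION & SPEC =====
-- Pre_ excludes exactly the inputs on which Python A raises ZeroDivisionError
-- (m = 0 together with some player count ≥ 0 reaches 'p // m'); B raises there too.
def Pre_solution (players : List Int) (m : Int) (k : Int) : Prop :=
  ¬ (m = 0 ∧ ∃ p ∈ players, 0 ≤ p)
instance (players : List Int) (m : Int) (k : Int) : Decidable (Pre_solution players m k) := by
  unfold Pre_solution; infer_instance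
def pvWitness_solution : List Int × Int × Int := ([1, 5, 0, 7], 2, 2)

def Spec_solution (players : List Int) (m : Int) (k : Int) (out : Int) : Prop := out = solution_alt players m k
instance (players : List Int) (m : Int) (k : Int) (out : Int) : Decidable (Spec_solution players m k out) := by unfold Spec_solution; infer_instance

-- ===== CLAIM (what is proved, stated in full; the proofs are below) =====
def Claim_equal_solution : Prop := ∀ (players : List Int) (m : Int) (k : Int), Dom_solution players m k → Pre_solution players m k → Spec_solution players m k (solution players m k)

-- ===== LEMMAS AND PROOFS =====

-- getD after an in-range set
lemma getD_set_eq (l : List Int) (i : Nat) (v : Int) (hi : i < l.length) (j : Nat) :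
    (l.set i v).getD j 0 = if j = i then v else l.getD j 0 := by
  rw [List.getD_eq_getElem?_getD, List.getD_eq_getElem?_getD, List.getElem?_set]
  by_cases h : j = i
  · subst h; simp [hi]
  · rw [if_neg (by omega), if_neg h]

lemma innerA_length (n : Nat) (need : Int) (time : Nat) :
    ∀ fuel kk server, (innerA n need time fuel kk server).length = server.length := by
  intro fuel
  induction fuel with
  | zero => intro kk server; rfl
  | succ f ih =>
      intro kk server
      by_cases h : time + kk < n
      · rw [innerA, if_pos h, ih]; simp
      · rw [innerA, if_neg h]

-- A's inner loop (with its break) adds `need` exactly on the slots [time+kk, time+kk+fuel) ∩ [0, n)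
lemma innerA_getD (n : Nat) (need : Int) (time : Nat) :
    ∀ fuel kk server, server.length = n →
      ∀ j, (innerA n need time fuel kk server).getD j 0
        = server.getD j 0 + (if time + kk ≤ j ∧ j < time + kk + fuel ∧ j < n then need else 0) := by
  intro fuel
  induction fuel with
  | zero => intro kk server _ j; simp [innerA]; omega
  | succ f ih =>
      intro kk server hlen j
      by_cases h : time + kk < n
      · rw [innerA, if_pos h]
        rw [ih (kk+1) _ (by simp [hlen]) j]
        rw [getD_set_eq _ _ _ (by omega) j]
        by_cases hj : j = time + kk
        · subst hj
          rw [if_pos rfl, if_neg (by omega), if_pos (by omega)]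
          ring
        · rw [if_neg hj]
          congr 1
          by_cases h1 : time + kk ≤ j ∧ j < time + kk + (f+1) ∧ j < n
          · rw [if_pos (by omega), if_pos h1]
          · rw [if_neg (by omega), if_neg h1]
      · rw [innerA, if_neg h, if_neg (by omega)]
        ring

lemma sum_Ico_getD_set (l : List Int) (idx : Nat) (v : Int) (hidx : idx < l.length) (a b : Nat) :
    (∑ i ∈ Finset.Ico a b, (l.set idx (l.getD idx 0 + v)).getD i 0)
      = (∑ i ∈ Finset.Ico a b, l.getD i 0) + (if a ≤ idx ∧ idx < b then v else 0) := by
  calc (∑ i ∈ Finset.Ico a b, (l.set idx (l.getD idx 0 + v)).getD i 0)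
      = ∑ i ∈ Finset.Ico a b, (l.getD i 0 + if i = idx then v else 0) := by
        apply Finset.sum_congr rfl; intro i _
        rw [getD_set_eq _ _ _ hidx i]
        by_cases h : i = idx <;> simp [h]
    _ = _ := by
        rw [Finset.sum_add_distrib, Finset.sum_ite_eq' (Finset.Ico a b) idx (fun _ => v)]
        simp [Finset.mem_Ico]

-- main loop correspondence: B's (cur, expire) state encodes A's server array —
-- for every not-yet-visited slot j, server[j] = cur - (expiry decrements due in (t..j])
lemma loop_eq (players : List Int) (m k : Int) (n : Nat) :
    ∀ fuel t server expire cur ans,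
      t + fuel = n →
      server.length = n →
      expire.length = n + 1 →
      (∀ j, t ≤ j → j < n →
        server.getD j 0 = cur - ∑ i ∈ Finset.Ico t (j+1), expire.getD i 0) →
      loopA players m k n fuel t server ans = loopB players m k n fuel t expire cur ans := by
  intro fuel
  induction fuel with
  | zero => intro t server expire cur ans _ _ _ _; rfl
  | succ f ih =>
      intro t server expire cur ans hfuel hslen helen hinv
      have ht : t < n := by omega
      have hsum_t : (∑ i ∈ Finset.Ico t (t+1), expire.getD i 0) = expire.getD t 0 := by
        rw [Finset.sum_Ico_succ_top (le_refl t)]; simp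
      have hs : server.getD t 0 = cur - expire.getD t 0 := by
        rw [hinv t (le_refl t) ht, hsum_t]
      have hshift : ∀ j, t + 1 ≤ j → j < n →
          server.getD j 0 = (cur - expire.getD t 0) - ∑ i ∈ Finset.Ico (t+1) (j+1), expire.getD i 0 := by
        intro j hj1 hj2
        rw [hinv j (by omega) hj2, Finset.sum_eq_sum_Ico_succ_bot (by omega : t < j + 1)]
        ring
      rw [loopA, loopB]
      simp only [hs]
      by_cases hbr : (cur - expire.getD t 0 + 1) * m ≤ players.getD t 0
      · rw [if_pos hbr, if_pos hbr]
        by_cases hk : 0 < k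
        · rw [if_pos hk]
          have hkn : 1 ≤ k.toNat := by omega
          by_cases hin : (t : Int) + k ≤ (n : Int)
          · rw [if_pos hin]
            have hidx : t + k.toNat ≤ n := by omega
            apply ih <;> try omega
            · rw [innerA_length, hslen]
            · simp [helen]
            · intro j hj1 hj2
              rw [innerA_getD n _ t k.toNat 0 server hslen j]
              rw [sum_Ico_getD_set _ _ _ (by omega) (t+1) (j+1)]
              rw [hshift j hj1 hj2]
              by_cases hlt : j < t + k.toNat
              · rw [if_pos (by omega), if_neg (by omega)]; ring
              · rw [if_neg (by omega), if_pos (by omega)]; ring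
          · rw [if_neg hin]
            have hout : n < t + k.toNat := by omega
            apply ih <;> try omega
            · rw [innerA_length, hslen]
            · intro j hj1 hj2
              rw [innerA_getD n _ t k.toNat 0 server hslen j]
              rw [hshift j hj1 hj2, if_pos (by omega)]
              ring
        · rw [if_neg hk]
          have hk0 : k.toNat = 0 := by omega
          rw [hk0, show innerA n (PySem.Int.floordiv (players.getD t 0) m - (cur - expire.getD t 0)) t 0 0 server = server from rfl]
          exact ih (t+1) server expire (cur - expire.getD t 0) _ (by omega) hslen helen hshift
      · rw [if_neg hbr, if_neg hbr]
        exact ih (t+1) server expire (cur - expire.getD t 0) _ (by omega) hslen helen hshift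

-- ===== VERDICT (by name: the statement is the Claim_ definition above) =====
theorem solution_spec : Claim_equal_solution := by
  intro players m k _ _
  unfold Spec_solution solution solution_alt
  apply loop_eq
  · omega
  · simp
  · simp
  · have hz : ∀ (N i : Nat), (List.replicate N (0:Int)).getD i 0 = 0 := by
      intro N i
      rw [List.getD_eq_getElem?_getD, List.getElem?_replicate]
      split <;> rfl
    intro j _ _
    rw [hz, Finset.sum_congr rfl (fun i _ => hz _ i), Finset.sum_const_zero]
    ring
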